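-- pv_equiv track=rewrite | github.com/dltnals317/Algorithm-Study | 백준/Silver/1388. 바닥 장식/바닥 장식.py | count_wooden_planks
-- ===== SOURCE A (Python) =====
-- def dfs(ground, visited, x, y, n, m, symbol):
--     stack = [(x, y)]
--     while stack:
--         cx, cy = stack.pop()
--         if visited[cx][cy]:
--             continue
--         visited[cx][cy] = True
--         if symbol == '-':
--             if cy + 1 < m and ground[cx][cy + 1] == '-' and not visited[cx][cy + 1]:
--                 stack.append((cx, cy + 1))
--         elif symbol == '|':
--             if cx + 1 < n and ground[cx + 1][cy] == '|' and not visited[cx + 1][cy]: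
--                 stack.append((cx + 1, cy))
--
-- def count_wooden_planks(n, m, ground):
--     visited = [[False] * m for _ in range(n)]
--     count = 0
--
--     for i in range(n):
--         for j in range(m):
--             if not visited[i][j]:
--                 if ground[i][j] == '-':
--                     dfs(ground, visited, i, j, n, m, '-')
--                     count += 1
--                 elif ground[i][j] == '|':
--                     dfs(ground, visited, i, j, n, m, '|')
--                     count += 1
--
--     return count
-- ===== SOURCE B (Python) =====
-- def count_wooden_planks(n, m, ground):
--     count = 0
--     for i in range(n):
--         for j in range(m):
--             ch = ground[i][j]
--             if ch == '-' and (j == 0 or ground[i][j - 1] != '-'):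
--                 count += 1
--             elif ch == '|' and (i == 0 or ground[i - 1][j] != '|'):
--                 count += 1
--     return count
-- ===== Notes on version B (the rewrite author's own statement) =====
-- stated objective: simpler
-- what changed: Replaced the DFS with explicit stack and visited matrix by a single double loop that counts run-starts (a '-' with no '-' to its left, a '|' with no '|' above).
import Mathlib
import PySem

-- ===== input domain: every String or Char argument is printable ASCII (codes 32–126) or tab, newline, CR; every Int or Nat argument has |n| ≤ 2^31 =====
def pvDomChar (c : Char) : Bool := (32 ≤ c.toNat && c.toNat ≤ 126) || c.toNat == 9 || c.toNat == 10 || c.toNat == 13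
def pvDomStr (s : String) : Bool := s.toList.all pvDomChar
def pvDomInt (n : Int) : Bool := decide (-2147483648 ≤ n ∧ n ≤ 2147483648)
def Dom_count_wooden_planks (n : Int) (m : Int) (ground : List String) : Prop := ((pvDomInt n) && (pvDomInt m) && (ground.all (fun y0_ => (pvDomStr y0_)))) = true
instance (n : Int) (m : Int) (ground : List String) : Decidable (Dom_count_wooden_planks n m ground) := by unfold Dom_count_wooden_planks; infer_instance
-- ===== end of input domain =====

-- B replaces A's stack DFS + visited matrix by one double loop counting run-starts: simpler, same O(n·m).
-- Equivalence is about the return value; A mutates only its own local 'visited'.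

-- shared grid accessor: ground[x][y] for in-range Nat indices (default outside Pre_, where Python raises)
def pvChar (ground : List String) (x y : Nat) : Char :=
  ((ground.getD x "").toList.getD y ' ')

-- ===== PORT A =====
def pvRead (v : List (List Bool)) (x y : Nat) : Bool :=
  (v.getD x []).getD y false

-- visited[cx][cy] = True
def pvSetCell (v : List (List Bool)) (x y : Nat) : List (List Bool) :=
  v.set x ((v.getD x []).set y true)

-- A's dfs: explicit stack (head = top), while-loop as fuel recursion (the caller's fuel n+m
-- bounds the loop: each iteration marks one cell of a single horizontal/vertical run)
def dfsA (ground : List String) (n m : Nat) (symbol : Char) :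
    Nat → List (Nat × Nat) → List (List Bool) → List (List Bool)
  | 0, _, v => v
  | _ + 1, [], v => v
  | fuel + 1, (cx, cy) :: stack, v =>
    if pvRead v cx cy then dfsA ground n m symbol fuel stack v
    else
      let v' := pvSetCell v cx cy
      if symbol = '-' then
        if cy + 1 < m ∧ pvChar ground cx (cy + 1) = '-' ∧ pvRead v' cx (cy + 1) = false then
          dfsA ground n m symbol fuel ((cx, cy + 1) :: stack) v'
        else dfsA ground n m symbol fuel stack v'
      else if symbol = '|' then
        if cx + 1 < n ∧ pvChar ground (cx + 1) cy = '|' ∧ pvRead v' (cx + 1) cy = false then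
          dfsA ground n m symbol fuel ((cx + 1, cy) :: stack) v'
        else dfsA ground n m symbol fuel stack v'
      else dfsA ground n m symbol fuel stack v'

def count_wooden_planks (n : Int) (m : Int) (ground : List String) : Int :=
  let N := n.toNat
  let M := m.toNat
  let visited0 : List (List Bool) := (List.range N).map (fun _ => List.replicate M false)
  let res := (List.range N).foldl (fun st i =>
      (List.range M).foldl (fun (st : List (List Bool) × Int) j =>
        if pvRead st.1 i j = false then
          if pvChar ground i j = '-' then (dfsA ground N M '-' (N + M) [(i, j)] st.1, st.2 + 1)
          else if pvChar ground i j = '|' then (dfsA ground N M '|' (N + M) [(i, j)] st.1, st.2 + 1)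
          else st
        else st) st) (visited0, (0 : Int))
  res.2

-- ===== PORT B =====
def count_wooden_planks_alt (n : Int) (m : Int) (ground : List String) : Int :=
  (List.range n.toNat).foldl (fun c i =>
    (List.range m.toNat).foldl (fun (c : Int) j =>
      if pvChar ground i j = '-' ∧ (j = 0 ∨ pvChar ground i (j - 1) ≠ '-') then c + 1
      else if pvChar ground i j = '|' ∧ (i = 0 ∨ pvChar ground (i - 1) j ≠ '|') then c + 1
      else c) c) 0

-- ===== PRECONDITION & SPEC =====
-- Pre_ excludes exactly the inputs where Python A raises an IndexError:
-- when n,m > 0 it needs at least n rows each of length at least m.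
def Pre_count_wooden_planks (n : Int) (m : Int) (ground : List String) : Prop :=
  0 < n → 0 < m →
    (n ≤ (ground.length : Int) ∧ ∀ i < n.toNat, m.toNat ≤ (ground.getD i "").toList.length)

instance (n : Int) (m : Int) (ground : List String) : Decidable (Pre_count_wooden_planks n m ground) := by
  unfold Pre_count_wooden_planks; infer_instance

def pvWitness_count_wooden_planks : Int × Int × List String := (2, 3, ["--|", "|-|"])

def Spec_count_wooden_planks (n : Int) (m : Int) (ground : List String) (out : Int) : Prop := out = count_wooden_planks_alt n m ground
instance (n : Int) (m : Int) (ground : List String) (out : Int) : Decidable (Spec_count_wooden_planks n m ground out) := by unfold Spec_count_wooden_planks; infer_instance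

-- ===== CLAIM (what is proved, stated in full; the proofs are below) =====
def Claim_equal_count_wooden_planks : Prop := ∀ (n : Int) (m : Int) (ground : List String), Dom_count_wooden_planks n m ground → Pre_count_wooden_planks n m ground → Spec_count_wooden_planks n m ground (count_wooden_planks n m ground)

-- ===== LEMMAS AND PROOFS =====

-- row-major order on positions
def pvLt (a b : Nat × Nat) : Prop := a.1 < b.1 ∨ (a.1 = b.1 ∧ a.2 < b.2)

-- start column of the horizontal '-' run through (i, y)
def pvHstart (g : List String) (i : Nat) : Nat → Nat
  | 0 => 0
  | y + 1 => if pvChar g i y = '-' then pvHstart g i y else y + 1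

-- start row of the vertical '|' run through (x, y)
def pvVstart (g : List String) (y : Nat) : Nat → Nat
  | 0 => 0
  | x + 1 => if pvChar g x y = '|' then pvVstart g y x else x + 1

-- model of A's visited matrix after all cells row-major-before p have been processed
def pvVis (g : List String) (p : Nat × Nat) (x y : Nat) : Prop :=
  (pvChar g x y = '-' ∧ pvLt (x, pvHstart g x y) p) ∨
  (pvChar g x y = '|' ∧ pvLt (pvVstart g y x, y) p)

def pvShape (N M : Nat) (v : List (List Bool)) : Prop :=
  v.length = N ∧ ∀ r ∈ v, r.length = M

def pvInRunH (g : List String) (i M j y : Nat) : Prop :=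
  j ≤ y ∧ y < M ∧ ∀ t, j ≤ t → t ≤ y → pvChar g i t = '-'

def pvInRunV (g : List String) (y N i x : Nat) : Prop :=
  i ≤ x ∧ x < N ∧ ∀ t, i ≤ t → t ≤ x → pvChar g t y = '|'

-- per-cell contribution B counts
def pvF (g : List String) (x y : Nat) : Int :=
  if pvChar g x y = '-' ∧ (y = 0 ∨ pvChar g x (y - 1) ≠ '-') then 1
  else if pvChar g x y = '|' ∧ (x = 0 ∨ pvChar g (x - 1) y ≠ '|') then 1
  else 0

def pvRowSum (g : List String) (x k : Nat) : Int := ∑ y ∈ Finset.range k, pvF g x y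

def pvPreCnt (g : List String) (M i j : Nat) : Int :=
  (∑ x ∈ Finset.range i, pvRowSum g x M) + pvRowSum g i j

def pvInv (g : List String) (N M i j : Nat) (st : List (List Bool) × Int) : Prop :=
  pvShape N M st.1 ∧
  (∀ x, x < N → ∀ y, y < M → (pvRead st.1 x y = true ↔ pvVis g (i, j) x y)) ∧
  st.2 = pvPreCnt g M i j

-- the two loop bodies, named so the fold lemmas can speak about them
def pvBodyA (g : List String) (N M i : Nat) (st : List (List Bool) × Int) (j : Nat) :
    List (List Bool) × Int :=
  if pvRead st.1 i j = false then
    if pvChar g i j = '-' then (dfsA g N M '-' (N + M) [(i, j)] st.1, st.2 + 1)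
    else if pvChar g i j = '|' then (dfsA g N M '|' (N + M) [(i, j)] st.1, st.2 + 1)
    else st
  else st

def pvBodyB (g : List String) (i : Nat) (c : Int) (j : Nat) : Int :=
  if pvChar g i j = '-' ∧ (j = 0 ∨ pvChar g i (j - 1) ≠ '-') then c + 1
  else if pvChar g i j = '|' ∧ (i = 0 ∨ pvChar g (i - 1) j ≠ '|') then c + 1
  else c

theorem foldl_range_inv {α : Type} (f : α → Nat → α) (P : Nat → α → Prop) :
    ∀ (k : Nat), (∀ i b, i < k → P i b → P (i + 1) (f b i)) → ∀ a, P 0 a →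
      P k ((List.range k).foldl f a) := by
  intro k
  induction k with
  | zero => intro _ a h0; simpa using h0
  | succ k ih =>
    intro hstep a h0
    rw [List.range_succ, List.foldl_append]
    exact hstep k _ (Nat.lt_succ_self k) (ih (fun i b hi => hstep i b (Nat.lt_succ_of_lt hi)) a h0)

theorem dfsA_nil (g : List String) (N M : Nat) (s : Char) (fuel : Nat) (v : List (List Bool)) :
    dfsA g N M s fuel [] v = v := by
  cases fuel <;> rfl

theorem pvRead_setCell (v : List (List Bool)) (a b x y : Nat)
    (ha : a < v.length) (hb : b < (v.getD a []).length) :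
    pvRead (pvSetCell v a b) x y = true ↔ ((x = a ∧ y = b) ∨ pvRead v x y = true) := by
  unfold pvRead pvSetCell
  simp only [List.getD_eq_getElem?_getD, List.getElem?_set]
  by_cases hx : a = x
  · subst hx
    simp only [if_pos ha]
    by_cases hy : b = y
    · subst hy
      have : ((v.getD a []).set b true).getD b false = true := by
        rw [List.getD_eq_getElem?_getD, List.getElem?_set_self hb]; rfl
      rw [List.getD_eq_getElem?_getD] at this
      simp_all [List.getD_eq_getElem?_getD]
    · have : ((v.getD a []).set b true)[y]? = (v.getD a [])[y]? := by
        rw [List.getElem?_set, if_neg hy]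
      simp_all [List.getD_eq_getElem?_getD, (Ne.symm hy)]
  · rw [if_neg hx]
    have hxx : ¬ (x = a) := fun h => hx h.symm
    simp [hxx]

theorem pvShape_setCell (N M : Nat) (v : List (List Bool)) (a b : Nat) (haN : a < N)
    (h : pvShape N M v) : pvShape N M (pvSetCell v a b) := by
  obtain ⟨hl, hr⟩ := h
  refine ⟨by simpa [pvSetCell] using hl, ?_⟩
  intro r hrmem
  rcases List.mem_or_eq_of_mem_set hrmem with hmem | rfl
  · exact hr r hmem
  · rw [List.length_set]
    have hav : a < v.length := by omega
    have : v.getD a [] = v[a] := by rw [List.getD_eq_getElem?_getD, List.getElem?_eq_getElem hav]; rfl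
    rw [this]; exact hr _ (List.getElem_mem hav)


-- ---- hstart lemmas ----
theorem hs_le (g : List String) (i : Nat) : ∀ y, pvHstart g i y ≤ y := by
  intro y; induction y with
  | zero => simp [pvHstart]
  | succ y ih => unfold pvHstart; split <;> omega

theorem hs_eq_self (g : List String) (i y : Nat) (h : y = 0 ∨ pvChar g i (y - 1) ≠ '-') :
    pvHstart g i y = y := by
  cases y with
  | zero => rfl
  | succ y =>
    rcases h with h | h
    · omega
    · unfold pvHstart; rw [if_neg (by simpa using h)]

theorem hs_succ (g : List String) (i y : Nat) (h : pvChar g i y = '-') :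
    pvHstart g i (y + 1) = pvHstart g i y := by
  conv_lhs => unfold pvHstart
  rw [if_pos h]

theorem hs_run (g : List String) (i : Nat) :
    ∀ y t, pvHstart g i y ≤ t → t < y → pvChar g i t = '-' := by
  intro y
  induction y with
  | zero => omega
  | succ y ih =>
    intro t h1 h2
    by_cases hc : pvChar g i y = '-'
    · rw [hs_succ g i y hc] at h1
      rcases Nat.lt_or_ge t y with h | h
      · exact ih t h1 h
      · have : t = y := by omega
        rwa [this]
    · rw [hs_eq_self g i (y+1) (Or.inr (by simpa using hc))] at h1
      omega

theorem hs_start_hsP (g : List String) (i : Nat) :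
    ∀ y, pvChar g i y = '-' →
      pvChar g i (pvHstart g i y) = '-' ∧
        (pvHstart g i y = 0 ∨ pvChar g i (pvHstart g i y - 1) ≠ '-') := by
  intro y
  induction y with
  | zero => intro h; exact ⟨h, Or.inl rfl⟩
  | succ y ih =>
    intro h
    by_cases hc : pvChar g i y = '-'
    · rw [hs_succ g i y hc]; exact ih hc
    · rw [hs_eq_self g i (y+1) (Or.inr (by simpa using hc))]
      exact ⟨h, Or.inr (by simpa using hc)⟩

theorem hs_of_run (g : List String) (i M j : Nat) (hj : pvHstart g i j = j) :
    ∀ y, pvInRunH g i M j y → pvHstart g i y = j := by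
  intro y
  induction y with
  | zero =>
    intro ⟨h1, _, _⟩
    have hj0 : j = 0 := by omega
    subst hj0; rfl
  | succ y ih =>
    intro ⟨h1, h2, h3⟩
    rcases Nat.lt_or_ge j (y + 1) with h | h
    · have hjy : j ≤ y := by omega
      have hcy : pvChar g i y = '-' := h3 y hjy (by omega)
      rw [hs_succ g i y hcy]
      exact ih ⟨hjy, by omega, fun t ht1 ht2 => h3 t ht1 (by omega)⟩
    · have : j = y + 1 := by omega
      rw [← this]; exact hj

theorem hs_eq_iff_run (g : List String) (i M j y : Nat) (hyM : y < M)
    (hj : pvHstart g i j = j) :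
    (pvChar g i y = '-' ∧ pvHstart g i y = j) ↔ pvInRunH g i M j y := by
  constructor
  · rintro ⟨hcy, hsy⟩
    have hle := hs_le g i y
    refine ⟨by omega, hyM, fun t ht1 ht2 => ?_⟩
    rcases Nat.lt_or_ge t y with h | h
    · exact hs_run g i y t (by omega) h
    · have : t = y := by omega
      rwa [this]
  · intro hr
    exact ⟨hr.2.2 y hr.1 (le_refl y), hs_of_run g i M j hj y hr⟩

-- ---- vstart lemmas (vertical mirror) ----
theorem vs_le (g : List String) (y : Nat) : ∀ x, pvVstart g y x ≤ x := by
  intro x; induction x with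
  | zero => simp [pvVstart]
  | succ x ih => unfold pvVstart; split <;> omega

theorem vs_eq_self (g : List String) (y x : Nat) (h : x = 0 ∨ pvChar g (x - 1) y ≠ '|') :
    pvVstart g y x = x := by
  cases x with
  | zero => rfl
  | succ x =>
    rcases h with h | h
    · omega
    · unfold pvVstart; rw [if_neg (by simpa using h)]

theorem vs_succ (g : List String) (y x : Nat) (h : pvChar g x y = '|') :
    pvVstart g y (x + 1) = pvVstart g y x := by
  conv_lhs => unfold pvVstart
  rw [if_pos h]

theorem vs_run (g : List String) (y : Nat) :
    ∀ x t, pvVstart g y x ≤ t → t < x → pvChar g t y = '|' := by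
  intro x
  induction x with
  | zero => omega
  | succ x ih =>
    intro t h1 h2
    by_cases hc : pvChar g x y = '|'
    · rw [vs_succ g y x hc] at h1
      rcases Nat.lt_or_ge t x with h | h
      · exact ih t h1 h
      · have : t = x := by omega
        rwa [this]
    · rw [vs_eq_self g y (x+1) (Or.inr (by simpa using hc))] at h1
      omega

theorem vs_start_vsP (g : List String) (y : Nat) :
    ∀ x, pvChar g x y = '|' →
      pvChar g (pvVstart g y x) y = '|' ∧
        (pvVstart g y x = 0 ∨ pvChar g (pvVstart g y x - 1) y ≠ '|') := by
  intro x
  induction x with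
  | zero => intro h; exact ⟨h, Or.inl rfl⟩
  | succ x ih =>
    intro h
    by_cases hc : pvChar g x y = '|'
    · rw [vs_succ g y x hc]; exact ih hc
    · rw [vs_eq_self g y (x+1) (Or.inr (by simpa using hc))]
      exact ⟨h, Or.inr (by simpa using hc)⟩

theorem vs_of_run (g : List String) (y N i : Nat) (hi : pvVstart g y i = i) :
    ∀ x, pvInRunV g y N i x → pvVstart g y x = i := by
  intro x
  induction x with
  | zero =>
    intro ⟨h1, _, _⟩
    have hi0 : i = 0 := by omega
    subst hi0; rfl
  | succ x ih =>
    intro ⟨h1, h2, h3⟩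
    rcases Nat.lt_or_ge i (x + 1) with h | h
    · have hix : i ≤ x := by omega
      have hcx : pvChar g x y = '|' := h3 x hix (by omega)
      rw [vs_succ g y x hcx]
      exact ih ⟨hix, by omega, fun t ht1 ht2 => h3 t ht1 (by omega)⟩
    · have : i = x + 1 := by omega
      rw [← this]; exact hi

theorem vs_eq_iff_run (g : List String) (y N i x : Nat) (hxN : x < N)
    (hi : pvVstart g y i = i) :
    (pvChar g x y = '|' ∧ pvVstart g y x = i) ↔ pvInRunV g y N i x := by
  constructor
  · rintro ⟨hcx, hsx⟩
    have hle := vs_le g y x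
    refine ⟨by omega, hxN, fun t ht1 ht2 => ?_⟩
    rcases Nat.lt_or_ge t x with h | h
    · exact vs_run g y x t (by omega) h
    · have : t = x := by omega
      rwa [this]
  · intro hr
    exact ⟨hr.2.2 x hr.1 (le_refl x), vs_of_run g y N i hi x hr⟩


theorem pvRow_len (N M : Nat) (v : List (List Bool)) (hsh : pvShape N M v)
    (a : Nat) (ha : a < N) : (v.getD a []).length = M := by
  have hav : a < v.length := by rw [hsh.1]; exact ha
  have : v.getD a [] = v[a] := by
    rw [List.getD_eq_getElem?_getD, List.getElem?_eq_getElem hav]; rfl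
  rw [this]; exact hsh.2 _ (List.getElem_mem hav)

theorem runH_succ_iff (g : List String) (i M j y : Nat) (h1 : j + 1 < M)
    (hcj : pvChar g i j = '-') (hc1 : pvChar g i (j + 1) = '-') :
    pvInRunH g i M j y ↔ (y = j ∨ pvInRunH g i M (j + 1) y) := by
  constructor
  · rintro ⟨ha, hb, hc⟩
    rcases Nat.eq_or_lt_of_le ha with h | h
    · exact Or.inl h.symm
    · exact Or.inr ⟨by omega, hb, fun t ht1 ht2 => hc t (by omega) ht2⟩
  · rintro (rfl | ⟨ha, hb, hc⟩)
    · refine ⟨le_refl y, by omega, fun t ht1 ht2 => ?_⟩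
      have : t = y := by omega
      rwa [this]
    · refine ⟨by omega, hb, fun t ht1 ht2 => ?_⟩
      rcases Nat.eq_or_lt_of_le ht1 with h | h
      · rwa [← h]
      · exact hc t (by omega) ht2

theorem runH_stop_iff (g : List String) (i M j y : Nat) (hjM : j < M)
    (hcj : pvChar g i j = '-') (hstop : ¬(j + 1 < M ∧ pvChar g i (j + 1) = '-')) :
    pvInRunH g i M j y ↔ y = j := by
  constructor
  · rintro ⟨ha, hb, hc⟩
    by_contra hne
    have hy : j + 1 ≤ y := by omega
    exact hstop ⟨by omega, hc (j + 1) (by omega) hy⟩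
  · rintro rfl
    refine ⟨le_refl y, hjM, fun t ht1 ht2 => ?_⟩
    have : t = y := by omega
    rwa [this]

theorem runV_succ_iff (g : List String) (y N i x : Nat) (h1 : i + 1 < N)
    (hci : pvChar g i y = '|') (hc1 : pvChar g (i + 1) y = '|') :
    pvInRunV g y N i x ↔ (x = i ∨ pvInRunV g y N (i + 1) x) := by
  constructor
  · rintro ⟨ha, hb, hc⟩
    rcases Nat.eq_or_lt_of_le ha with h | h
    · exact Or.inl h.symm
    · exact Or.inr ⟨by omega, hb, fun t ht1 ht2 => hc t (by omega) ht2⟩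
  · rintro (rfl | ⟨ha, hb, hc⟩)
    · refine ⟨le_refl x, by omega, fun t ht1 ht2 => ?_⟩
      have : t = x := by omega
      rwa [this]
    · refine ⟨by omega, hb, fun t ht1 ht2 => ?_⟩
      rcases Nat.eq_or_lt_of_le ht1 with h | h
      · rwa [← h]
      · exact hc t (by omega) ht2

theorem runV_stop_iff (g : List String) (y N i x : Nat) (hiN : i < N)
    (hci : pvChar g i y = '|') (hstop : ¬(i + 1 < N ∧ pvChar g (i + 1) y = '|')) :
    pvInRunV g y N i x ↔ x = i := by
  constructor
  · rintro ⟨ha, hb, hc⟩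
    by_contra hne
    have hx : i + 1 ≤ x := by omega
    exact hstop ⟨by omega, hc (i + 1) (by omega) hx⟩
  · rintro rfl
    refine ⟨le_refl x, hiN, fun t ht1 ht2 => ?_⟩
    have : t = x := by omega
    rwa [this]

theorem dfsA_h (g : List String) (N M i : Nat) (hiN : i < N) :
    ∀ fuel j v, M ≤ fuel + j → j < M → pvChar g i j = '-' → pvShape N M v →
      (∀ k, pvInRunH g i M j k → pvRead v i k = false) →
      pvShape N M (dfsA g N M '-' fuel [(i, j)] v) ∧
      (∀ x y, pvRead (dfsA g N M '-' fuel [(i, j)] v) x y = true ↔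
        ((x = i ∧ pvInRunH g i M j y) ∨ pvRead v x y = true)) := by
  intro fuel
  induction fuel with
  | zero => intro j v hfuel hjM; omega
  | succ fuel ih =>
    intro j v hfuel hjM hcj hsh hv
    have hrunj : pvInRunH g i M j j := by
      refine ⟨le_refl j, hjM, fun t ht1 ht2 => ?_⟩
      have : t = j := by omega
      rwa [this]
    have hvj : pvRead v i j = false := hv j hrunj
    have hlen : v.length = N := hsh.1
    have hrow : (v.getD i []).length = M := pvRow_len N M v hsh i hiN
    have hset := fun x y => pvRead_setCell v i j x y (by omega) (by omega)
    have hsh' : pvShape N M (pvSetCell v i j) := pvShape_setCell N M v i j hiN hsh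
    have hunfold : dfsA g N M '-' (fuel + 1) [(i, j)] v =
        (if j + 1 < M ∧ pvChar g i (j + 1) = '-' ∧
            pvRead (pvSetCell v i j) i (j + 1) = false then
          dfsA g N M '-' fuel [(i, j + 1)] (pvSetCell v i j)
        else dfsA g N M '-' fuel [] (pvSetCell v i j)) := by
      conv_lhs => rw [dfsA]
      rw [if_neg (by simp [hvj]), if_pos rfl]
    rw [hunfold]
    clear hunfold
    by_cases hcont : j + 1 < M ∧ pvChar g i (j + 1) = '-'
    · have hrun1 : pvInRunH g i M j (j + 1) := by
        refine ⟨by omega, hcont.1, fun t ht1 ht2 => ?_⟩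
        rcases Nat.eq_or_lt_of_le ht1 with h | h
        · rwa [← h]
        · have : t = j + 1 := by omega
          rw [this]; exact hcont.2
      have hread : pvRead (pvSetCell v i j) i (j + 1) = false := by
        rw [← Bool.not_eq_true, hset i (j + 1)]
        rintro (⟨_, h⟩ | h)
        · omega
        · rw [hv (j + 1) hrun1] at h; exact Bool.false_ne_true h
      rw [if_pos ⟨hcont.1, hcont.2, hread⟩]
      have hv' : ∀ k, pvInRunH g i M (j + 1) k → pvRead (pvSetCell v i j) i k = false := by
        intro k hk
        have hkj : j + 1 ≤ k := hk.1
        have hkrun : pvInRunH g i M j k := by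
          rw [runH_succ_iff g i M j k hcont.1 hcj hcont.2]
          exact Or.inr hk
        rw [← Bool.not_eq_true, hset i k]
        rintro (⟨_, h⟩ | h)
        · omega
        · rw [hv k hkrun] at h; exact Bool.false_ne_true h
      obtain ⟨ihs, ihr⟩ := ih (j + 1) (pvSetCell v i j) (by omega) hcont.1 hcont.2 hsh' hv'
      refine ⟨ihs, fun x y => ?_⟩
      rw [ihr x y, hset x y, runH_succ_iff g i M j y hcont.1 hcj hcont.2]
      constructor
      · rintro (⟨rfl, hr⟩ | ⟨rfl, rfl⟩ | h)
        · exact Or.inl ⟨rfl, Or.inr hr⟩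
        · exact Or.inl ⟨rfl, Or.inl rfl⟩
        · exact Or.inr h
      · rintro (⟨rfl, rfl | hr⟩ | h)
        · exact Or.inr (Or.inl ⟨rfl, rfl⟩)
        · exact Or.inl ⟨rfl, hr⟩
        · exact Or.inr (Or.inr h)
    · have hstop : ¬(j + 1 < M ∧ pvChar g i (j + 1) = '-' ∧
          pvRead (pvSetCell v i j) i (j + 1) = false) := by
        rintro ⟨h1, h2, _⟩; exact hcont ⟨h1, h2⟩
      rw [if_neg hstop, dfsA_nil]
      refine ⟨hsh', fun x y => ?_⟩
      rw [hset x y]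
      constructor
      · rintro (⟨hx, hy⟩ | h)
        · exact Or.inl ⟨hx, hy ▸ (runH_stop_iff g i M j y hjM hcj hcont).mpr hy⟩
        · exact Or.inr h
      · rintro (⟨hx, hr⟩ | h)
        · exact Or.inl ⟨hx, (runH_stop_iff g i M j y hjM hcj hcont).mp hr⟩
        · exact Or.inr h


theorem dfsA_v (g : List String) (N M j : Nat) (hjM : j < M) :
    ∀ fuel i v, N ≤ fuel + i → i < N → pvChar g i j = '|' → pvShape N M v →
      (∀ k, pvInRunV g j N i k → pvRead v k j = false) →
      pvShape N M (dfsA g N M '|' fuel [(i, j)] v) ∧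
      (∀ x y, pvRead (dfsA g N M '|' fuel [(i, j)] v) x y = true ↔
        ((y = j ∧ pvInRunV g j N i x) ∨ pvRead v x y = true)) := by
  intro fuel
  induction fuel with
  | zero => intro i v hfuel hiN; omega
  | succ fuel ih =>
    intro i v hfuel hiN hci hsh hv
    have hruni : pvInRunV g j N i i := by
      refine ⟨le_refl i, hiN, fun t ht1 ht2 => ?_⟩
      have : t = i := by omega
      rwa [this]
    have hvi : pvRead v i j = false := hv i hruni
    have hlen : v.length = N := hsh.1
    have hrow : (v.getD i []).length = M := pvRow_len N M v hsh i hiN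
    have hset := fun x y => pvRead_setCell v i j x y (by omega) (by omega)
    have hsh' : pvShape N M (pvSetCell v i j) := pvShape_setCell N M v i j hiN hsh
    have hunfold : dfsA g N M '|' (fuel + 1) [(i, j)] v =
        (if i + 1 < N ∧ pvChar g (i + 1) j = '|' ∧
            pvRead (pvSetCell v i j) (i + 1) j = false then
          dfsA g N M '|' fuel [(i + 1, j)] (pvSetCell v i j)
        else dfsA g N M '|' fuel [] (pvSetCell v i j)) := by
      conv_lhs => rw [dfsA]
      rw [if_neg (by simp [hvi]), if_neg (by decide), if_pos rfl]
    rw [hunfold]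
    clear hunfold
    by_cases hcont : i + 1 < N ∧ pvChar g (i + 1) j = '|'
    · have hrun1 : pvInRunV g j N i (i + 1) := by
        refine ⟨by omega, hcont.1, fun t ht1 ht2 => ?_⟩
        rcases Nat.eq_or_lt_of_le ht1 with h | h
        · rwa [← h]
        · have : t = i + 1 := by omega
          rw [this]; exact hcont.2
      have hread : pvRead (pvSetCell v i j) (i + 1) j = false := by
        rw [← Bool.not_eq_true, hset (i + 1) j]
        rintro (⟨h, _⟩ | h)
        · omega
        · rw [hv (i + 1) hrun1] at h; exact Bool.false_ne_true h
      rw [if_pos ⟨hcont.1, hcont.2, hread⟩]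
      have hv' : ∀ k, pvInRunV g j N (i + 1) k → pvRead (pvSetCell v i j) k j = false := by
        intro k hk
        have hki : i + 1 ≤ k := hk.1
        have hkrun : pvInRunV g j N i k := by
          rw [runV_succ_iff g j N i k hcont.1 hci hcont.2]
          exact Or.inr hk
        rw [← Bool.not_eq_true, hset k j]
        rintro (⟨h, _⟩ | h)
        · omega
        · rw [hv k hkrun] at h; exact Bool.false_ne_true h
      obtain ⟨ihs, ihr⟩ := ih (i + 1) (pvSetCell v i j) (by omega) hcont.1 hcont.2 hsh' hv'
      refine ⟨ihs, fun x y => ?_⟩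
      rw [ihr x y, hset x y, runV_succ_iff g j N i x hcont.1 hci hcont.2]
      constructor
      · rintro (⟨rfl, hr⟩ | ⟨rfl, rfl⟩ | h)
        · exact Or.inl ⟨rfl, Or.inr hr⟩
        · exact Or.inl ⟨rfl, Or.inl rfl⟩
        · exact Or.inr h
      · rintro (⟨rfl, rfl | hr⟩ | h)
        · exact Or.inr (Or.inl ⟨rfl, rfl⟩)
        · exact Or.inl ⟨rfl, hr⟩
        · exact Or.inr (Or.inr h)
    · have hstop : ¬(i + 1 < N ∧ pvChar g (i + 1) j = '|' ∧
          pvRead (pvSetCell v i j) (i + 1) j = false) := by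
        rintro ⟨h1, h2, _⟩; exact hcont ⟨h1, h2⟩
      rw [if_neg hstop, dfsA_nil]
      refine ⟨hsh', fun x y => ?_⟩
      rw [hset x y]
      constructor
      · rintro (⟨hx, hy⟩ | h)
        · exact Or.inl ⟨hy, hx ▸ (runV_stop_iff g j N i x hiN hci hcont).mpr hx⟩
        · exact Or.inr h
      · rintro (⟨hy, hr⟩ | h)
        · exact Or.inl ⟨(runV_stop_iff g j N i x hiN hci hcont).mp hr, hy⟩
        · exact Or.inr h


theorem pvLt_succ (a b i j : Nat) : pvLt (a, b) (i, j + 1) ↔ (pvLt (a, b) (i, j) ∨ (a = i ∧ b = j)) := by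
  unfold pvLt; dsimp only; omega

theorem pvLt_self_iff (i j b : Nat) : pvLt (i, b) (i, j) ↔ b < j := by
  unfold pvLt; dsimp only; omega

theorem pvVis_succ (g : List String) (i j x y : Nat) :
    pvVis g (i, j + 1) x y ↔
      (pvVis g (i, j) x y ∨
        (pvChar g x y = '-' ∧ x = i ∧ pvHstart g x y = j) ∨
        (pvChar g x y = '|' ∧ pvVstart g y x = i ∧ y = j)) := by
  unfold pvVis
  rw [pvLt_succ, pvLt_succ]
  tauto

theorem hsP_iff (g : List String) (i j : Nat) (hc : pvChar g i j = '-') :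
    pvHstart g i j = j ↔ (j = 0 ∨ pvChar g i (j - 1) ≠ '-') := by
  constructor
  · intro h
    have := (hs_start_hsP g i j hc).2
    rwa [h] at this
  · exact hs_eq_self g i j

theorem vsP_iff (g : List String) (i j : Nat) (hc : pvChar g i j = '|') :
    pvVstart g j i = i ↔ (i = 0 ∨ pvChar g (i - 1) j ≠ '|') := by
  constructor
  · intro h
    have := (vs_start_vsP g j i hc).2
    rwa [h] at this
  · exact vs_eq_self g j i

theorem pvPreCnt_succ (g : List String) (M i j : Nat) :
    pvPreCnt g M i (j + 1) = pvPreCnt g M i j + pvF g i j := by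
  unfold pvPreCnt pvRowSum
  rw [Finset.sum_range_succ]; ring

theorem stepA (g : List String) (N M i j : Nat) (hiN : i < N) (hjM : j < M)
    (st : List (List Bool) × Int) (h : pvInv g N M i j st) :
    pvInv g N M i (j + 1) (pvBodyA g N M i st j) := by
  obtain ⟨v, c⟩ := st
  obtain ⟨hsh, hvis, hcnt⟩ := h
  simp only [] at hsh hvis hcnt
  have hvji : pvRead v i j = true ↔ pvVis g (i, j) i j := hvis i hiN j hjM
  by_cases hc1 : pvChar g i j = '-'
  · by_cases hs1 : pvHstart g i j = j
    · -- run start of a horizontal run: A flood-fills it and counts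
      have hvf : pvRead v i j = false := by
        rw [← Bool.not_eq_true, hvji]
        rintro (⟨_, hlt⟩ | ⟨hc2, _⟩)
        · rw [hs1, pvLt_self_iff] at hlt; omega
        · rw [hc1] at hc2; exact absurd hc2 (by decide)
      have hvrun : ∀ k, pvInRunH g i M j k → pvRead v i k = false := by
        intro k hk
        rw [← Bool.not_eq_true, hvis i hiN k hk.2.1]
        rintro (⟨hck, hlt⟩ | ⟨hck, _⟩)
        · rw [hs_of_run g i M j hs1 k hk, pvLt_self_iff] at hlt; omega
        · rw [hk.2.2 k hk.1 (le_refl k)] at hck; exact absurd hck (by decide)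
      obtain ⟨rs, rr⟩ := dfsA_h g N M i hiN (N + M) j v (by omega) hjM hc1 hsh hvrun
      have hbody : pvBodyA g N M i (v, c) j = (dfsA g N M '-' (N + M) [(i, j)] v, c + 1) := by
        unfold pvBodyA
        rw [if_pos hvf, if_pos hc1]
      rw [hbody]
      refine ⟨rs, ?_, ?_⟩
      · intro x hx y hy
        simp only []
        rw [rr x y, hvis x hx y hy, pvVis_succ]
        constructor
        · rintro (⟨hxe, hr⟩ | h)
          · subst x
            have := (hs_eq_iff_run g i M j y hy hs1).mpr hr
            exact Or.inr (Or.inl ⟨this.1, rfl, this.2⟩)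
          · exact Or.inl h
        · rintro (h | ⟨hcy, hxe, hsy⟩ | ⟨hcy, hvy, hye⟩)
          · exact Or.inr h
          · subst x
            exact Or.inl ⟨rfl, (hs_eq_iff_run g i M j y hy hs1).mp ⟨hcy, hsy⟩⟩
          · subst y
            have := (vs_start_vsP g j x hcy).1
            rw [hvy, hc1] at this
            exact absurd this (by decide)
      · simp only []
        rw [hcnt, pvPreCnt_succ]
        have hF : pvF g i j = 1 := by
          unfold pvF
          rw [if_pos ⟨hc1, (hsP_iff g i j hc1).mp hs1⟩]
        rw [hF]
    · -- interior of a horizontal run: already visited, A skips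
      have hlt : pvHstart g i j < j := by
        have := hs_le g i j; omega
      have hvt : pvRead v i j = true := hvji.mpr (Or.inl ⟨hc1, (pvLt_self_iff i j _).mpr hlt⟩)
      have hbody : pvBodyA g N M i (v, c) j = (v, c) := by
        unfold pvBodyA
        rw [if_neg (by simp [hvt])]
      rw [hbody]
      refine ⟨hsh, ?_, ?_⟩
      · intro x hx y hy
        simp only []
        rw [hvis x hx y hy, pvVis_succ]
        constructor
        · exact fun h => Or.inl h
        · rintro (h | ⟨hcy, hxe, hsy⟩ | ⟨hcy, hvy, hye⟩)
          · exact h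
          · subst x
            have h2 := (hs_start_hsP g i y hcy).2
            rw [hsy] at h2
            exact absurd ((hsP_iff g i j hc1).mpr h2) hs1
          · subst y
            have := (vs_start_vsP g j x hcy).1
            rw [hvy, hc1] at this
            exact absurd this (by decide)
      · simp only []
        rw [hcnt, pvPreCnt_succ]
        have hF : pvF g i j = 0 := by
          unfold pvF
          rw [if_neg, if_neg]
          · rintro ⟨hcc, _⟩; rw [hc1] at hcc; exact absurd hcc (by decide)
          · rintro ⟨_, hP⟩; exact hs1 ((hsP_iff g i j hc1).mpr hP)
        rw [hF]; ring
  · by_cases hc2 : pvChar g i j = '|'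
    · by_cases hs1 : pvVstart g j i = i
      · -- run start of a vertical run
        have hvf : pvRead v i j = false := by
          rw [← Bool.not_eq_true, hvji]
          rintro (⟨hcc, _⟩ | ⟨_, hlt⟩)
          · exact hc1 hcc
          · rw [hs1] at hlt
            unfold pvLt at hlt; dsimp only at hlt; omega
        have hvrun : ∀ k, pvInRunV g j N i k → pvRead v k j = false := by
          intro k hk
          rw [← Bool.not_eq_true, hvis k hk.2.1 j hjM]
          rintro (⟨hck, _⟩ | ⟨hck, hlt⟩)
          · rw [hk.2.2 k hk.1 (le_refl k)] at hck; exact absurd hck (by decide)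
          · rw [vs_of_run g j N i hs1 k hk] at hlt
            unfold pvLt at hlt; dsimp only at hlt; omega
        obtain ⟨rs, rr⟩ := dfsA_v g N M j hjM (N + M) i v (by omega) hiN hc2 hsh hvrun
        have hbody : pvBodyA g N M i (v, c) j = (dfsA g N M '|' (N + M) [(i, j)] v, c + 1) := by
          unfold pvBodyA
          rw [if_pos hvf, if_neg hc1, if_pos hc2]
        rw [hbody]
        refine ⟨rs, ?_, ?_⟩
        · intro x hx y hy
          simp only []
          rw [rr x y, hvis x hx y hy, pvVis_succ]
          constructor
          · rintro (⟨hye, hr⟩ | h)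
            · subst y
              have := (vs_eq_iff_run g j N i x hx hs1).mpr hr
              exact Or.inr (Or.inr ⟨this.1, this.2, rfl⟩)
            · exact Or.inl h
          · rintro (h | ⟨hcy, hxe, hsy⟩ | ⟨hcy, hvy, hye⟩)
            · exact Or.inr h
            · subst x
              have := (hs_start_hsP g i y hcy).1
              rw [hsy] at this
              exact absurd this hc1
            · subst y
              exact Or.inl ⟨rfl, (vs_eq_iff_run g j N i x hx hs1).mp ⟨hcy, hvy⟩⟩
        · simp only []
          rw [hcnt, pvPreCnt_succ]
          have hF : pvF g i j = 1 := by
            unfold pvF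
            rw [if_neg, if_pos ⟨hc2, (vsP_iff g i j hc2).mp hs1⟩]
            rintro ⟨hcc, _⟩; exact hc1 hcc
          rw [hF]
      · -- interior of a vertical run
        have hlt : pvVstart g j i < i := by
          have := vs_le g j i; omega
        have hvt : pvRead v i j = true := by
          rw [hvji]
          exact Or.inr ⟨hc2, Or.inl hlt⟩
        have hbody : pvBodyA g N M i (v, c) j = (v, c) := by
          unfold pvBodyA
          rw [if_neg (by simp [hvt])]
        rw [hbody]
        refine ⟨hsh, ?_, ?_⟩
        · intro x hx y hy
          simp only []
          rw [hvis x hx y hy, pvVis_succ]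
          constructor
          · exact fun h => Or.inl h
          · rintro (h | ⟨hcy, hxe, hsy⟩ | ⟨hcy, hvy, hye⟩)
            · exact h
            · subst x
              have := (hs_start_hsP g i y hcy).1
              rw [hsy] at this
              exact absurd this hc1
            · subst y
              refine absurd ((vsP_iff g i j hc2).mpr ?_) hs1
              have h2 := (vs_start_vsP g j x hcy).2
              rw [hvy] at h2
              exact h2
        · simp only []
          rw [hcnt, pvPreCnt_succ]
          have hF : pvF g i j = 0 := by
            unfold pvF
            rw [if_neg, if_neg]
            · rintro ⟨_, hP⟩; exact hs1 ((vsP_iff g i j hc2).mpr hP)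
            · rintro ⟨hcc, _⟩; exact hc1 hcc
          rw [hF]; ring
    · -- not a plank cell: nothing happens
      have hvf : pvRead v i j = false := by
        rw [← Bool.not_eq_true, hvji]
        rintro (⟨hcc, _⟩ | ⟨hcc, _⟩)
        · exact hc1 hcc
        · exact hc2 hcc
      have hbody : pvBodyA g N M i (v, c) j = (v, c) := by
        unfold pvBodyA
        rw [if_pos hvf, if_neg hc1, if_neg hc2]
      rw [hbody]
      refine ⟨hsh, ?_, ?_⟩
      · intro x hx y hy
        simp only []
        rw [hvis x hx y hy, pvVis_succ]
        constructor
        · exact fun h => Or.inl h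
        · rintro (h | ⟨hcy, hxe, hsy⟩ | ⟨hcy, hvy, hye⟩)
          · exact h
          · subst x
            have := (hs_start_hsP g i y hcy).1
            rw [hsy] at this
            exact absurd this hc1
          · subst y
            have := (vs_start_vsP g j x hcy).1
            rw [hvy] at this
            exact absurd this hc2
      · simp only []
        rw [hcnt, pvPreCnt_succ]
        have hF : pvF g i j = 0 := by
          unfold pvF
          rw [if_neg, if_neg]
          · rintro ⟨hcc, _⟩; exact hc2 hcc
          · rintro ⟨hcc, _⟩; exact hc1 hcc
        rw [hF]; ring


theorem rowTrans (g : List String) (N M i : Nat) (st : List (List Bool) × Int)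
    (h : pvInv g N M i M st) : pvInv g N M (i + 1) 0 st := by
  obtain ⟨hsh, hvis, hcnt⟩ := h
  refine ⟨hsh, ?_, ?_⟩
  · intro x hx y hy
    rw [hvis x hx y hy]
    have e1 : pvLt (x, pvHstart g x y) (i, M) ↔ pvLt (x, pvHstart g x y) (i + 1, 0) := by
      have := hs_le g x y
      unfold pvLt; dsimp only; omega
    have e2 : pvLt (pvVstart g y x, y) (i, M) ↔ pvLt (pvVstart g y x, y) (i + 1, 0) := by
      unfold pvLt; dsimp only; omega
    unfold pvVis
    rw [e1, e2]
  · rw [hcnt]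
    unfold pvPreCnt pvRowSum
    rw [Finset.sum_range_succ]
    simp

theorem initInv (g : List String) (N M : Nat) :
    pvInv g N M 0 0 ((List.range N).map (fun _ => List.replicate M false), 0) := by
  refine ⟨⟨by simp, ?_⟩, ?_, by simp [pvPreCnt, pvRowSum]⟩
  · intro r hr
    simp only [List.mem_map] at hr
    obtain ⟨a, _, rfl⟩ := hr
    simp
  · intro x hx y hy
    have hread : pvRead ((List.range N).map fun _ => List.replicate M false) x y = false := by
      unfold pvRead
      have hrow : ((List.range N).map fun _ => List.replicate M false).getD x [] =
          List.replicate M false := by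
        rw [List.getD_eq_getElem?_getD, List.getElem?_map]
        simp [hx]
      rw [hrow]
      simp [List.getD_eq_getElem?_getD]
    rw [hread]
    simp only [Bool.false_eq_true, false_iff]
    rintro (⟨_, hlt⟩ | ⟨_, hlt⟩) <;>
      · unfold pvLt at hlt; dsimp only at hlt; omega

theorem A_eq (g : List String) (N M : Nat) :
    ((List.range N).foldl (fun st i => (List.range M).foldl (pvBodyA g N M i) st)
      ((List.range N).map (fun _ => List.replicate M false), (0 : Int))).2 =
      pvPreCnt g M N 0 := by
  have hmain := foldl_range_inv
    (fun st i => (List.range M).foldl (pvBodyA g N M i) st)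
    (fun i st => pvInv g N M i 0 st) N
    (fun i st hi hInv => by
      refine rowTrans g N M i _ ?_
      exact foldl_range_inv (pvBodyA g N M i) (fun j st' => pvInv g N M i j st') M
        (fun j st' hj h' => stepA g N M i j hi hj st' h') st hInv)
    _ (initInv g N M)
  exact hmain.2.2

theorem B_inner (g : List String) (M i : Nat) (c : Int) :
    (List.range M).foldl (pvBodyB g i) c = c + pvRowSum g i M := by
  refine foldl_range_inv (pvBodyB g i) (fun j c' => c' = c + pvRowSum g i j) M
    (fun j c' hj h => ?_) c (by simp [pvRowSum])
  rw [h]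
  simp only [pvRowSum, Finset.sum_range_succ]
  unfold pvBodyB pvF
  split_ifs <;> ring

theorem B_eq (g : List String) (N M : Nat) :
    (List.range N).foldl (fun c i => (List.range M).foldl (pvBodyB g i) c) (0 : Int) =
      pvPreCnt g M N 0 := by
  have hmain := foldl_range_inv
    (fun c i => (List.range M).foldl (pvBodyB g i) c)
    (fun i c => c = ∑ x ∈ Finset.range i, pvRowSum g x M) N
    (fun i c hi h => by
      dsimp only at h ⊢
      rw [B_inner, h, Finset.sum_range_succ])
    0 (by simp)
  rw [hmain]
  unfold pvPreCnt pvRowSum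
  simp

theorem count_wooden_planks_spec : Claim_equal_count_wooden_planks := by
  intro n m g _ _
  unfold Spec_count_wooden_planks count_wooden_planks count_wooden_planks_alt
  show ((List.range n.toNat).foldl
      (fun st i => (List.range m.toNat).foldl (pvBodyA g n.toNat m.toNat i) st)
      ((List.range n.toNat).map (fun _ => List.replicate m.toNat false), (0 : Int))).2 =
    (List.range n.toNat).foldl (fun c i => (List.range m.toNat).foldl (pvBodyB g i) c) (0 : Int)
  rw [A_eq, B_eq]
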